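-- pv_equiv track=rewrite | github.com/hksawczuk/grahamtools | examples/graham_from_coeffs.py | canonical_tree
-- ===== SOURCE A (Python) =====
-- def canonical_tree(adj):
--     """Canonical string for a connected tree given as adjacency dict."""
--     vertices = sorted(adj.keys())
--     n = len(vertices)
--     if n == 0:
--         return "()"
--     if n == 1:
--         return "()"
--     if n == 2:
--         return "(())"
--
--     deg = {v: len(adj[v]) for v in vertices}
--     leaves = [v for v in vertices if deg[v] <= 1]
--     removed = set()
--     remaining = n
--
--     while remaining > 2:
--         new_leaves = []
--         for v in leaves:
--             removed.add(v)
--             remaining -= 1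
--             for u in adj[v]:
--                 if u not in removed:
--                     deg[u] -= 1
--                     if deg[u] == 1:
--                         new_leaves.append(u)
--         leaves = new_leaves
--
--     centers = [v for v in vertices if v not in removed]
--
--     def rc(root, parent):
--         ch = sorted(rc(u, root) for u in adj[root] if u != parent)
--         return "(" + "".join(ch) + ")"
--
--     if len(centers) == 1:
--         return rc(centers[0], None)
--     else:
--         c0, c1 = centers[0], centers[1]
--         ch0 = sorted(rc(u, c0) for u in adj[c0] if u != c1)
--         ch1 = sorted(rc(u, c1) for u in adj[c1] if u != c0)
--         opt1 = (tuple(ch0), tuple(ch1))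
--         opt2 = (tuple(ch1), tuple(ch0))
--         return "E" + str(min(opt1, opt2))
-- ===== SOURCE B (Python) =====
-- def canonical_tree(adj):
--     """Canonical string for a connected tree given as adjacency dict.
--     Re-implementation: finds the center(s) by repeatedly filtering the surviving
--     vertex list on recomputed induced degree (no incremental degree/removed-set
--     bookkeeping), and picks the two-center orientation by one list comparison
--     instead of building and min-ing both option tuples."""
--     vertices = sorted(adj)
--     n = len(vertices)
--     if n <= 1:
--         return "()"
--     if n == 2:
--         return "(())"
--
--     remaining = vertices
--     while len(remaining) > 2:
--         remaining = [v for v in remaining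
--                      if sum(1 for u in adj[v] if u in remaining) > 1]
--
--     def rc(root, parent):
--         ch = sorted(rc(u, root) for u in adj[root] if u != parent)
--         return "(" + "".join(ch) + ")"
--
--     if len(remaining) == 1:
--         return rc(remaining[0], None)
--     c0, c1 = remaining[0], remaining[1]
--     ch0 = sorted(rc(u, c0) for u in adj[c0] if u != c1)
--     ch1 = sorted(rc(u, c1) for u in adj[c1] if u != c0)
--     pair = (tuple(ch1), tuple(ch0)) if ch1 < ch0 else (tuple(ch0), tuple(ch1))
--     return "E" + str(pair)
-- ===== Notes on version B (the rewrite author's own statement) =====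
-- stated objective: simpler
-- what changed: The center-finding pass is a different algorithm: instead of A's incremental leaf-peeling state (degree dict updated in place, a removed set, a queue of new leaves and a running count), B keeps only the list of surviving vertices and repeatedly filters it on induced degrees recomputed from scratch; the two-center orientation is picked by one list comparison instead of building both option tuples and taking min.
-- outside the precondition, e.g. on canonical_tree({1: [2], 2: [1, 3], 3: [2], 4: []}): A returns '(()())', B returns '(()())'; on canonical_tree({1: [2], 2: [1], 3: [4], 4: [3]}): A raises IndexError, B raises IndexError
import Mathlib
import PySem

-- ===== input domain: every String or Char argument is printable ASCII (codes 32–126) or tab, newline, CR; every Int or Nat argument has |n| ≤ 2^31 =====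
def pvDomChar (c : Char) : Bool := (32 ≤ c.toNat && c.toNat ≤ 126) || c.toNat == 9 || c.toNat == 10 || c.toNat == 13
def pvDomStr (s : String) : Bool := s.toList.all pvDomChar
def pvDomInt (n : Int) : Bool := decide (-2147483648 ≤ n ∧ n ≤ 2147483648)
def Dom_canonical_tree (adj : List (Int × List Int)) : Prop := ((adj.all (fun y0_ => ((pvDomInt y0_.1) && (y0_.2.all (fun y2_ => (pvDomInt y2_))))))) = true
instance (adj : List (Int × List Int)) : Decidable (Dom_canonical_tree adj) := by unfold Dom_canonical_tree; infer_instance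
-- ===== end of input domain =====

-- B replaces A's incremental leaf-peeling (degree dict + removed set + leaf queue) by
-- repeatedly filtering the surviving vertex list on recomputed induced degrees, and picks
-- the two-center orientation by one list comparison instead of min over both option tuples
-- (objective: simpler; the equivalence is about the return value; neither program mutates adj).

-- ===== PORT A =====
-- Helpers shared by both ports (both Pythons contain this identical recursive builder
-- and identical str()-formatting of the result tuple).
-- Python string/list-of-strings '<' (code-point lexicographic), as used by tuple
-- comparison, list comparison and min.
def strListLt : List String → List String → Bool
  | _, [] => false
  | [], _ :: _ => true
  | a :: as, b :: bs => if a < b then true else if b < a then false else strListLt as bs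

-- str(tuple_of_strings): the strings here contain only '(' and ')', so repr(s) = "'s'"
-- (exact for quote- and backslash-free printable-ASCII strings).
def tupRepr : List String → String
  | [] => "()"
  | [s] => "('" ++ s ++ "',)"
  | xs => "(" ++ String.intercalate ", " (xs.map (fun s => "'" ++ s ++ "'")) ++ ")"

def pairRepr (p : List String × List String) : String :=
  "(" ++ tupRepr p.1 ++ ", " ++ tupRepr p.2 ++ ")"

-- def rc(root, parent): ch = sorted(rc(u, root) for u in adj[root] if u != parent); return "(" + "".join(ch) + ")"
-- (fuel-bounded structural recursion; within Pre_ the recursion depth stays below the fuel used)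
def rcGo (adjd : PySem.Dict Int (List Int)) : Nat → Int → Option Int → String
  | 0, _, _ => ""
  | f + 1, root, parent =>
      "(" ++ String.join (PySem.List.sorted
          (((adjd.getD root []).filter (fun u => some u != parent)).map
            (fun u => rcGo adjd f u (some root))) (fun s => s) false) ++ ")"

-- A-only helpers: the incremental peeling loop.
-- state: (removed, remaining, deg, leaves/new_leaves)
def StA : Type := PySem.Set Int × Int × PySem.Dict Int Int × List Int

-- inner 'for u in adj[v]:' body
def stepU (rem : PySem.Set Int) (st : PySem.Dict Int Int × List Int) (u : Int) :
    PySem.Dict Int Int × List Int :=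
  if PySem.Set.contains rem u then st
  else
    let deg' := st.1.insert u (st.1.getD u 0 - 1)
    if deg'.getD u 0 == 1 then (deg', st.2 ++ [u]) else (deg', st.2)

-- 'for v in leaves:' body
def stepV (adjd : PySem.Dict Int (List Int)) (st : StA) (v : Int) : StA :=
  let removed' := PySem.Set.add st.1 v
  let remaining' := st.2.1 - 1
  let inner := (adjd.getD v []).foldl (stepU removed') (st.2.2.1, st.2.2.2)
  (removed', remaining', inner.1, inner.2)

-- one iteration of 'while remaining > 2:' (new_leaves starts empty)
def roundA (adjd : PySem.Dict Int (List Int)) (st : StA) : StA :=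
  st.2.2.2.foldl (stepV adjd) (st.1, st.2.1, st.2.2.1, ([] : List Int))

def whileA (adjd : PySem.Dict Int (List Int)) : Nat → StA → StA
  | 0, st => st
  | f + 1, st => if 2 < st.2.1 then whileA adjd f (roundA adjd st) else st

-- A-only: Python tuple '<' for the (tuple, tuple) options of min(opt1, opt2)
def tupLt (p q : List String × List String) : Bool :=
  if strListLt p.1 q.1 then true
  else if strListLt q.1 p.1 then false
  else strListLt p.2 q.2

def canonical_tree (adj : List (Int × List Int)) : String :=
  let adjd := PySem.Dict.mk adj
  let vertices := PySem.List.sorted adjd.keys (fun v => v) false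
  let n := vertices.length
  if n = 0 then "()"
  else if n = 1 then "()"
  else if n = 2 then "(())"
  else
    let deg0 := vertices.foldl (fun d v => d.insert v ((adjd.getD v []).length : Int))
      PySem.Dict.empty
    let leaves0 := vertices.filter (fun v => deg0.getD v 0 ≤ 1)
    let st := whileA adjd (n + 1) (PySem.Set.empty, (n : Int), deg0, leaves0)
    let centers := vertices.filter (fun v => !(PySem.Set.contains st.1 v))
    if centers.length = 1 then rcGo adjd n (PySem.List.pyGetD centers 0 0) none
    else
      let c0 := PySem.List.pyGetD centers 0 0
      let c1 := PySem.List.pyGetD centers 1 0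
      let ch0 := PySem.List.sorted (((adjd.getD c0 []).filter (fun u => u != c1)).map
        (fun u => rcGo adjd n u (some c0))) (fun s => s) false
      let ch1 := PySem.List.sorted (((adjd.getD c1 []).filter (fun u => u != c0)).map
        (fun u => rcGo adjd n u (some c1))) (fun s => s) false
      "E" ++ pairRepr (if tupLt (ch1, ch0) (ch0, ch1) then (ch1, ch0) else (ch0, ch1))

-- ===== PORT B =====
-- sum(1 for u in adj[v] if u in remaining)
def degIn (adjd : PySem.Dict Int (List Int)) (R : List Int) (v : Int) : Nat :=
  (adjd.getD v []).countP (fun u => decide (u ∈ R))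

def whileB (adjd : PySem.Dict Int (List Int)) : Nat → List Int → List Int
  | 0, R => R
  | f + 1, R =>
      if 2 < R.length then whileB adjd f (R.filter (fun v => 1 < degIn adjd R v)) else R

def canonical_tree_alt (adj : List (Int × List Int)) : String :=
  let adjd := PySem.Dict.mk adj
  let vertices := PySem.List.sorted adjd.keys (fun v => v) false
  let n := vertices.length
  if n ≤ 1 then "()"
  else if n = 2 then "(())"
  else
    let remaining := whileB adjd (n + 1) vertices
    if remaining.length = 1 then rcGo adjd n (PySem.List.pyGetD remaining 0 0) none
    else
      let c0 := PySem.List.pyGetD remaining 0 0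
      let c1 := PySem.List.pyGetD remaining 1 0
      let ch0 := PySem.List.sorted (((adjd.getD c0 []).filter (fun u => u != c1)).map
        (fun u => rcGo adjd n u (some c0))) (fun s => s) false
      let ch1 := PySem.List.sorted (((adjd.getD c1 []).filter (fun u => u != c0)).map
        (fun u => rcGo adjd n u (some c1))) (fun s => s) false
      "E" ++ pairRepr (if strListLt ch1 ch0 then (ch1, ch0) else (ch0, ch1))

-- ===== PRECONDITION & SPEC =====
def nbrsOf (adj : List (Int × List Int)) (v : Int) : List Int :=
  (PySem.Dict.mk adj).getD v []

def reachExpand (adj : List (Int × List Int)) (S : List Int) : List Int :=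
  PySem.List.dedup (S ++ S.flatMap (fun v => nbrsOf adj v))

def reachSet (adj : List (Int × List Int)) : Nat → List Int
  | 0 => ((PySem.Dict.mk adj).keys).take 1
  | k + 1 => reachExpand adj (reachSet adj k)

-- Pre_ requires adj to be a genuine dict (no duplicate keys) and, when it has at least 3
-- keys, a symmetric self-loop-free connected tree: on other adjacency data A diverges
-- (a cycle stalls the peeling loop forever / rc recurses unboundedly), raises
-- (KeyError/IndexError/RecursionError), or — on some disconnected forests — returns a
-- value that is an accident of whichever component survives the peeling.
def Pre_canonical_tree (adj : List (Int × List Int)) : Prop :=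
  (adj.map Prod.fst).Nodup ∧
  (adj.length ≤ 2 ∨
    ((∀ p ∈ adj, p.2.Nodup ∧ p.1 ∉ p.2 ∧ ∀ u ∈ p.2, u ∈ adj.map Prod.fst) ∧
     (∀ p ∈ adj, ∀ u ∈ p.2, p.1 ∈ nbrsOf adj u) ∧
     (adj.map (fun p => p.2.length)).sum = 2 * (adj.length - 1) ∧
     (∀ k ∈ adj.map Prod.fst, k ∈ reachSet adj adj.length)))

instance (adj : List (Int × List Int)) : Decidable (Pre_canonical_tree adj) := by
  unfold Pre_canonical_tree; infer_instance

def pvWitness_canonical_tree : (List (Int × List Int)) := [(1, [2]), (2, [1, 3]), (3, [2])]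

def Spec_canonical_tree (adj : List (Int × List Int)) (out : String) : Prop :=
  out = canonical_tree_alt adj
instance (adj : List (Int × List Int)) (out : String) : Decidable (Spec_canonical_tree adj out) := by
  unfold Spec_canonical_tree; infer_instance

-- ===== CLAIM (what is proved, stated in full; the proofs are below) =====
def Claim_equal_canonical_tree : Prop :=
  ∀ (adj : List (Int × List Int)), Dom_canonical_tree adj → Pre_canonical_tree adj →
    Spec_canonical_tree adj (canonical_tree adj)

-- ===== LEMMAS AND PROOFS =====

-- the symmetric-simple-graph facts the equivalence proof uses, over the sorted key list
def SymG (adjd : PySem.Dict Int (List Int)) (vs : List Int) : Prop :=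
  vs.Nodup ∧
  (∀ v ∈ vs, (adjd.getD v []).Nodup) ∧
  (∀ v ∈ vs, ∀ u ∈ adjd.getD v [], u ∈ vs) ∧
  (∀ v ∈ vs, ∀ u ∈ adjd.getD v [], v ∈ adjd.getD u [])

def survivors (vs : List Int) (rem : PySem.Set Int) : List Int :=
  vs.filter (fun v => !(PySem.Set.contains rem v))

lemma contains_false_iff (s : PySem.Set Int) (x : Int) :
    PySem.Set.contains s x = false ↔ x ∉ s := by
  constructor
  · intro h hm
    have hc : PySem.Set.contains s x = true := List.contains_iff_mem.mpr hm
    rw [hc] at h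
    cases h
  · intro h
    cases hc : PySem.Set.contains s x
    · rfl
    · exact absurd (List.contains_iff_mem.mp hc) h

lemma contains_eq_decide (s : PySem.Set Int) (x : Int) :
    PySem.Set.contains s x = decide (x ∈ s) := by
  by_cases h : x ∈ s
  · have hc : PySem.Set.contains s x = true := List.contains_iff_mem.mpr h
    rw [hc]; simp [h]
  · rw [(contains_false_iff s x).mpr h]; simp [h]

lemma band_split {a b : Bool} (h : (a && b) = true) : a = true ∧ b = true := by
  cases a <;> cases b <;> simp_all

lemma mem_survivors (vs : List Int) (rem : PySem.Set Int) (x : Int) :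
    x ∈ survivors vs rem ↔ (x ∈ vs ∧ x ∉ rem) := by
  unfold survivors
  rw [List.mem_filter, contains_eq_decide]
  by_cases h : x ∈ rem <;> simp [h]

lemma countP_part (l : List Int) (p q r : Int → Bool)
    (h : ∀ x ∈ l, (p x = (q x || r x)) ∧ ¬(q x = true ∧ r x = true)) :
    l.countP p = l.countP q + l.countP r := by
  induction l with
  | nil => simp
  | cons a t ih =>
      obtain ⟨hpa, hqr⟩ := h a (by simp)
      have ih' := ih (fun x hx => h x (by simp [hx]))
      simp only [List.countP_cons]
      rw [ih', hpa]
      cases hq : q a <;> cases hr : r a <;> simp [hq, hr] at hqr ⊢ <;> omega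

lemma countP_single (l : List Int) (hnd : l.Nodup) (v : Int) :
    l.countP (fun x => decide (x ∈ ([v] : List Int))) = if v ∈ l then 1 else 0 := by
  induction l with
  | nil => simp
  | cons a t ih =>
      obtain ⟨hat, hnd'⟩ := List.nodup_cons.mp hnd
      by_cases hv : a = v
      · subst hv
        simp only [List.countP_cons]
        rw [ih hnd']
        simp [hat]
      · simp only [List.countP_cons]
        rw [ih hnd']
        have : v ∈ a :: t ↔ v ∈ t := by simp [Ne.symm hv]
        by_cases hvt : v ∈ t <;> simp [hvt, this, hv]

lemma degIn_append_singleton (adjd : PySem.Dict Int (List Int)) (done : List Int)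
    (v u : Int) (hnd : (adjd.getD u []).Nodup) (hvd : v ∉ done) :
    degIn adjd (done ++ [v]) u =
      degIn adjd done u + (if v ∈ adjd.getD u [] then 1 else 0) := by
  unfold degIn
  rw [countP_part (adjd.getD u []) _ (fun x => decide (x ∈ done))
    (fun x => decide (x ∈ ([v] : List Int))) ?hside, countP_single _ hnd v]
  case hside =>
    intro x _
    constructor
    · by_cases h1 : x ∈ done <;> by_cases h2 : x = v <;>
        simp [h1, h2, List.mem_append]
    · rintro ⟨h1, h2⟩
      simp at h1 h2
      exact hvd (h2 ▸ h1)

-- invariant across one peeling round, after processing the prefix `done` of `leaves`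
def Mid (adjd : PySem.Dict Int (List Int)) (R leaves done : List Int)
    (removed0 : PySem.Set Int) (rem0 : Int) (st : StA) : Prop :=
  (∀ x : Int, x ∈ st.1 ↔ (x ∈ removed0 ∨ x ∈ done)) ∧
  st.2.1 = rem0 - done.length ∧
  (∀ u ∈ R, u ∉ done →
    (st.2.2.1).getD u 0 = (degIn adjd R u : Int) - (degIn adjd done u : Int)) ∧
  (st.2.2.2).Nodup ∧
  (∀ u : Int, u ∈ st.2.2.2 ↔
    (u ∈ R ∧ u ∉ leaves ∧ (degIn adjd R u : Int) - (degIn adjd done u : Int) ≤ 1))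

-- invariant between peeling rounds
def OuterInv (adjd : PySem.Dict Int (List Int)) (vs R : List Int) (st : StA) : Prop :=
  survivors vs st.1 = R ∧
  st.2.1 = (R.length : Int) ∧
  (∀ u ∈ R, (st.2.2.1).getD u 0 = (degIn adjd R u : Int)) ∧
  (st.2.2.2).Nodup ∧
  (∀ u : Int, u ∈ st.2.2.2 ↔ (u ∈ R ∧ degIn adjd R u ≤ 1))

lemma inner_spec (rem : PySem.Set Int) (ns : List Int) (hns : ns.Nodup) :
    ∀ (deg : PySem.Dict Int Int) (nl : List Int),
    ((ns.foldl (stepU rem) (deg, nl)).2 =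
      nl ++ ns.filter (fun u => !(PySem.Set.contains rem u) && (deg.getD u 0 == 2))) ∧
    (∀ u : Int, ((ns.foldl (stepU rem) (deg, nl)).1).getD u 0 =
      if u ∈ ns ∧ PySem.Set.contains rem u = false then deg.getD u 0 - 1
      else deg.getD u 0) := by
  induction ns with
  | nil =>
      intro deg nl
      refine ⟨by simp, fun u => by simp⟩
  | cons a t ih =>
      intro deg nl
      obtain ⟨hat, htnd⟩ := List.nodup_cons.mp hns
      have iht := ih htnd
      by_cases hc : PySem.Set.contains rem a = true
      · have hcm : a ∈ rem := List.contains_iff_mem.mp hc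
        have hstep : stepU rem (deg, nl) a = (deg, nl) := by
          unfold stepU
          rw [if_pos hc]
        rw [List.foldl_cons, hstep]
        refine ⟨?_, ?_⟩
        · rw [(iht deg nl).1, List.filter_cons]
          simp [hcm]
        · intro u
          rw [(iht deg nl).2 u]
          by_cases hu : u = a
          · subst hu; simp [hcm, hat]
          · simp [hu]
      · have hcf : PySem.Set.contains rem a = false := by
          cases h : PySem.Set.contains rem a
          · rfl
          · exact absurd h hc
        have hcm : a ∉ rem := (contains_false_iff rem a).mp hcf
        have hga : (deg.insert a (deg.getD a 0 - 1)).getD a 0 = deg.getD a 0 - 1 := by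
          rw [PySem.Dict.getD_insert]; simp
        have hgne : ∀ u : Int, u ≠ a →
            (deg.insert a (deg.getD a 0 - 1)).getD u 0 = deg.getD u 0 := by
          intro u hu; rw [PySem.Dict.getD_insert]; simp [hu]
        have hstep : stepU rem (deg, nl) a =
            (deg.insert a (deg.getD a 0 - 1),
             nl ++ (if deg.getD a 0 == 2 then [a] else [])) := by
          unfold stepU
          rw [if_neg (fun h => Bool.false_ne_true (hcf.symm.trans h))]
          show (if (deg.insert a (deg.getD a 0 - 1)).getD a 0 == 1 then
              ((deg.insert a (deg.getD a 0 - 1) : PySem.Dict Int Int), nl ++ [a])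
            else (deg.insert a (deg.getD a 0 - 1), nl)) = _
          rw [hga]
          by_cases h2 : deg.getD a 0 = 2
          · rw [if_pos (by rw [h2]; rfl), if_pos (beq_iff_eq.mpr h2)]
          · rw [if_neg (fun h => h2 (by have := beq_iff_eq.mp h; omega)),
               if_neg (fun h => h2 (beq_iff_eq.mp h))]
            simp
        rw [List.foldl_cons, hstep]
        obtain ⟨e1, e2⟩ := iht (deg.insert a (deg.getD a 0 - 1))
          (nl ++ (if deg.getD a 0 == 2 then [a] else []))
        refine ⟨?_, ?_⟩
        · rw [e1, List.filter_cons]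
          have hfc : ∀ x ∈ t,
              (!(PySem.Set.contains rem x) &&
                ((deg.insert a (deg.getD a 0 - 1)).getD x 0 == 2)) =
              (!(PySem.Set.contains rem x) && (deg.getD x 0 == 2)) := by
            intro x hx
            rw [hgne x (by rintro rfl; exact hat hx)]
          rw [List.filter_congr hfc]
          by_cases h2 : deg.getD a 0 = 2 <;> simp [h2, hcm]
        · intro u
          rw [e2 u]
          by_cases hu : u = a
          · subst hu
            simp [hat, hcm, hga]
          · rw [hgne u hu]
            simp [hu]

lemma mid_step (adjd : PySem.Dict Int (List Int)) (vs R leaves done : List Int)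
    (removed0 : PySem.Set Int) (rem0 : Int) (hSym : SymG adjd vs)
    (hR : R = survivors vs removed0)
    (hL : ∀ x : Int, x ∈ leaves ↔ (x ∈ R ∧ degIn adjd R x ≤ 1)) (hLnd : leaves.Nodup)
    (v : Int) (todo : List Int) (hsplit : done ++ v :: todo = leaves)
    (st : StA) (hmid : Mid adjd R leaves done removed0 rem0 st) :
    Mid adjd R leaves (done ++ [v]) removed0 rem0 (stepV adjd st v) := by
  obtain ⟨hvsnd, hadjnd, hclosed, hsym⟩ := hSym
  unfold Mid at hmid ⊢
  obtain ⟨h1, h2, h3, h4, h5⟩ := hmid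
  have hdn : (done ++ v :: todo).Nodup := by rw [hsplit]; exact hLnd
  have hvdone : v ∉ done := by
    have hdisj := (List.nodup_append.mp hdn).2.2
    intro hv
    exact hdisj v hv v (by simp) rfl
  have hvleaves : v ∈ leaves := by rw [← hsplit]; simp
  obtain ⟨hvR, hvdeg⟩ := (hL v).mp hvleaves
  have hvvs : v ∈ vs := ((mem_survivors vs removed0 v).mp (hR ▸ hvR)).1
  have hns_nd : (adjd.getD v []).Nodup := hadjnd v hvvs
  have hrm' : ∀ x : Int, x ∈ PySem.Set.add st.1 v ↔ (x ∈ removed0 ∨ x ∈ done ∨ x = v) := by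
    intro x
    rw [PySem.Set.mem_add, h1 x]
    tauto
  have hconF : ∀ x : Int, x ∉ removed0 → x ∉ done → x ≠ v →
      PySem.Set.contains (PySem.Set.add st.1 v) x = false := by
    intro x hx1 hx2 hx3
    exact (contains_false_iff _ _).mpr (fun hm => by
      rcases (hrm' x).mp hm with h | h | h
      · exact hx1 h
      · exact hx2 h
      · exact hx3 h)
  have hmemR : ∀ x : Int, x ∈ vs → x ∉ removed0 → x ∈ R := by
    intro x hx1 hx2
    rw [hR]; exact (mem_survivors vs removed0 x).mpr ⟨hx1, hx2⟩
  have hnotRem : ∀ x : Int, x ∈ R → x ∉ removed0 := by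
    intro x hx
    exact ((mem_survivors vs removed0 x).mp (hR ▸ hx)).2
  have hmemVs : ∀ x : Int, x ∈ R → x ∈ vs := by
    intro x hx
    exact ((mem_survivors vs removed0 x).mp (hR ▸ hx)).1
  obtain ⟨hfold1, hfold2⟩ := inner_spec (PySem.Set.add st.1 v) (adjd.getD v []) hns_nd
    st.2.2.1 st.2.2.2
  have hstv : stepV adjd st v =
      (PySem.Set.add st.1 v, st.2.1 - 1,
       ((adjd.getD v []).foldl (stepU (PySem.Set.add st.1 v)) (st.2.2.1, st.2.2.2)).1,
       ((adjd.getD v []).foldl (stepU (PySem.Set.add st.1 v)) (st.2.2.1, st.2.2.2)).2) := rfl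
  rw [hstv]
  refine ⟨?_, ?_, ?_, ?_, ?_⟩
  · intro x
    show x ∈ PySem.Set.add st.1 v ↔ _
    rw [hrm' x]
    simp [List.mem_append]
  · show st.2.1 - 1 = rem0 - ((done ++ [v]).length : Int)
    rw [h2]
    simp only [List.length_append, List.length_singleton]
    push_cast
    ring
  · intro u huR hud'
    have hud : u ∉ done := fun h => hud' (by simp [h])
    have hune : u ≠ v := fun h => hud' (by simp [h])
    have hu0 : u ∉ removed0 := hnotRem u huR
    have huvs : u ∈ vs := hmemVs u huR
    have hundAdj : (adjd.getD u []).Nodup := hadjnd u huvs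
    show (((adjd.getD v []).foldl (stepU (PySem.Set.add st.1 v)) (st.2.2.1, st.2.2.2)).1).getD u 0
      = (degIn adjd R u : Int) - (degIn adjd (done ++ [v]) u : Int)
    rw [hfold2 u, degIn_append_singleton adjd done v u hundAdj hvdone]
    by_cases hmem : u ∈ adjd.getD v []
    · have hvu : v ∈ adjd.getD u [] := hsym v hvvs u hmem
      rw [if_pos ⟨hmem, hconF u hu0 hud hune⟩, h3 u huR hud, if_pos hvu]
      push_cast
      ring
    · have hvu : v ∉ adjd.getD u [] := fun h => hmem (hsym u huvs v h)
      rw [if_neg (fun hh => hmem hh.1), h3 u huR hud, if_neg hvu]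
      push_cast
      ring
  · show (((adjd.getD v []).foldl (stepU (PySem.Set.add st.1 v)) (st.2.2.1, st.2.2.2)).2).Nodup
    rw [hfold1]
    refine List.Nodup.append h4 (List.Nodup.filter _ hns_nd) ?_
    intro x hx1 hx2
    obtain ⟨hxns, hxp⟩ := List.mem_filter.mp hx2
    obtain ⟨hxc, hx2eq⟩ := band_split hxp
    have hxcon : PySem.Set.contains (PySem.Set.add st.1 v) x = false := by
      cases h : PySem.Set.contains (PySem.Set.add st.1 v) x
      · rfl
      · rw [h] at hxc; cases hxc
    have hxnm := (contains_false_iff _ _).mp hxcon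
    have hxd : x ∉ done := fun h => hxnm ((hrm' x).mpr (Or.inr (Or.inl h)))
    obtain ⟨hxR, hxl, hxle⟩ := (h5 x).mp hx1
    have := h3 x hxR hxd
    rw [this] at hx2eq
    have : (degIn adjd R x : Int) - (degIn adjd done x : Int) = 2 := beq_iff_eq.mp hx2eq
    omega
  · intro u
    show u ∈ ((adjd.getD v []).foldl (stepU (PySem.Set.add st.1 v)) (st.2.2.1, st.2.2.2)).2 ↔ _
    rw [hfold1, List.mem_append, List.mem_filter]
    constructor
    · rintro (hnl | ⟨hun, hp⟩)
      · obtain ⟨huR, hul, hle⟩ := (h5 u).mp hnl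
        have hundAdj : (adjd.getD u []).Nodup := hadjnd u (hmemVs u huR)
        refine ⟨huR, hul, ?_⟩
        rw [degIn_append_singleton adjd done v u hundAdj hvdone]
        by_cases hvu : v ∈ adjd.getD u [] <;> simp [hvu] <;> omega
      · obtain ⟨hxc, hx2eq⟩ := band_split hp
        have hxcon : PySem.Set.contains (PySem.Set.add st.1 v) u = false := by
          cases h : PySem.Set.contains (PySem.Set.add st.1 v) u
          · rfl
          · rw [h] at hxc; cases hxc
        have hxnm := (contains_false_iff _ _).mp hxcon
        have hu0 : u ∉ removed0 := fun h => hxnm ((hrm' u).mpr (Or.inl h))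
        have hud : u ∉ done := fun h => hxnm ((hrm' u).mpr (Or.inr (Or.inl h)))
        have hune : u ≠ v := fun h => hxnm ((hrm' u).mpr (Or.inr (Or.inr h)))
        have huvs : u ∈ vs := hclosed v hvvs u hun
        have huR : u ∈ R := hmemR u huvs hu0
        have hvu : v ∈ adjd.getD u [] := hsym v hvvs u hun
        have hundAdj : (adjd.getD u []).Nodup := hadjnd u huvs
        have hdval := h3 u huR hud
        rw [hdval] at hx2eq
        have heq2 : (degIn adjd R u : Int) - (degIn adjd done u : Int) = 2 :=
          beq_iff_eq.mp hx2eq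
        have hul : u ∉ leaves := by
          intro hul
          have := ((hL u).mp hul).2
          omega
        refine ⟨huR, hul, ?_⟩
        rw [degIn_append_singleton adjd done v u hundAdj hvdone, if_pos hvu]
        push_cast
        omega
    · rintro ⟨huR, hul, hle⟩
      have hud : u ∉ done := fun h => hul (by rw [← hsplit]; simp [h])
      have hune : u ≠ v := fun h => hul (h ▸ hvleaves)
      have hu0 : u ∉ removed0 := hnotRem u huR
      have huvs : u ∈ vs := hmemVs u huR
      have hundAdj : (adjd.getD u []).Nodup := hadjnd u huvs
      rw [degIn_append_singleton adjd done v u hundAdj hvdone] at hle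
      by_cases hcase : (degIn adjd R u : Int) - (degIn adjd done u : Int) ≤ 1
      · exact Or.inl ((h5 u).mpr ⟨huR, hul, hcase⟩)
      · right
        by_cases hvu : v ∈ adjd.getD u []
        · rw [if_pos hvu] at hle
          have heq2 : (degIn adjd R u : Int) - (degIn adjd done u : Int) = 2 := by
            push_cast at hle hcase ⊢
            omega
          have hun : u ∈ adjd.getD v [] := hsym u huvs v hvu
          refine ⟨hun, ?_⟩
          rw [hconF u hu0 hud hune, h3 u huR hud]
          simp [heq2]
        · rw [if_neg hvu] at hle
          push_cast at hle hcase
          omega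

lemma mid_run (adjd : PySem.Dict Int (List Int)) (vs R leaves : List Int)
    (removed0 : PySem.Set Int) (rem0 : Int) (hSym : SymG adjd vs)
    (hR : R = survivors vs removed0)
    (hL : ∀ x : Int, x ∈ leaves ↔ (x ∈ R ∧ degIn adjd R x ≤ 1)) (hLnd : leaves.Nodup) :
    ∀ (todo done : List Int) (st : StA), done ++ todo = leaves →
      Mid adjd R leaves done removed0 rem0 st →
      Mid adjd R leaves leaves removed0 rem0 (todo.foldl (stepV adjd) st) := by
  intro todo
  induction todo with
  | nil =>
      intro done st h hmid
      rw [List.append_nil] at h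
      subst h
      exact hmid
  | cons v todo ih =>
      intro done st h hmid
      have hstep := mid_step adjd vs R leaves done removed0 rem0 hSym hR hL hLnd v todo h
        st hmid
      have h' : (done ++ [v]) ++ todo = leaves := by simpa using h
      exact ih (done ++ [v]) (stepV adjd st v) h' hstep

lemma round_spec (adjd : PySem.Dict Int (List Int)) (vs R : List Int) (hSym : SymG adjd vs)
    (st : StA) (hinv : OuterInv adjd vs R st) :
    OuterInv adjd vs (R.filter (fun v => 1 < degIn adjd R v)) (roundA adjd st) := by
  unfold OuterInv at hinv ⊢
  obtain ⟨hs1, hs2, hs3, hs4, hs5⟩ := hinv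
  have hvsnd := hSym.1
  have hRnd : R.Nodup := hs1 ▸ (List.Nodup.filter _ hvsnd)
  have hL : ∀ x : Int, x ∈ st.2.2.2 ↔ (x ∈ R ∧ degIn adjd R x ≤ 1) := hs5
  have hmid0 : Mid adjd R st.2.2.2 [] st.1 st.2.1 (st.1, st.2.1, st.2.2.1, ([] : List Int)) := by
    unfold Mid
    refine ⟨?_, ?_, ?_, ?_, ?_⟩
    · intro x; simp
    · simp
    · intro u huR _
      show st.2.2.1.getD u 0 = _
      rw [hs3 u huR]
      simp [degIn]
    · exact List.nodup_nil
    · intro u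
      simp only [List.mem_nil_iff, false_iff]
      rintro ⟨huR, hul, hle⟩
      have h0 : (degIn adjd ([] : List Int) u : Int) = 0 := by simp [degIn]
      rw [h0] at hle
      have : degIn adjd R u ≤ 1 := by omega
      exact hul ((hL u).mpr ⟨huR, this⟩)
  have hrun := mid_run adjd vs R st.2.2.2 st.1 st.2.1 hSym hs1.symm hL hs4
    st.2.2.2 [] (st.1, st.2.1, st.2.2.1, ([] : List Int)) rfl hmid0
  have hround : roundA adjd st = st.2.2.2.foldl (stepV adjd) (st.1, st.2.1, st.2.2.1, ([] : List Int)) := rfl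
  rw [hround]
  unfold Mid at hrun
  obtain ⟨m1, m2, m3, m4, m5⟩ := hrun
  set R' := R.filter (fun v => 1 < degIn adjd R v) with hR'
  set st' := st.2.2.2.foldl (stepV adjd) (st.1, st.2.1, st.2.2.1, ([] : List Int)) with hst'
  have hmemR' : ∀ x : Int, x ∈ R' ↔ (x ∈ R ∧ 1 < degIn adjd R x) := by
    intro x
    rw [hR', List.mem_filter]
    simp
  have hnotleaves : ∀ x : Int, x ∈ R → (x ∉ st.2.2.2 ↔ 1 < degIn adjd R x) := by
    intro x hx
    rw [hL x]
    constructor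
    · intro h
      by_contra hc
      exact h ⟨hx, by omega⟩
    · intro h hc
      have := hc.2
      omega
  have hpart : ∀ u : Int, degIn adjd R u = degIn adjd R' u + degIn adjd st.2.2.2 u := by
    intro u
    unfold degIn
    apply countP_part
    intro x _
    constructor
    · by_cases h2 : x ∈ st.2.2.2
      · obtain ⟨hxR, hxle⟩ := (hL x).mp h2
        have hxn : x ∉ R' := by
          intro hx'
          have := ((hmemR' x).mp hx').2
          omega
        simp [hxR, h2, hxn]
      · by_cases h3 : x ∈ R
        · have hgt : 1 < degIn adjd R x := (hnotleaves x h3).mp h2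
          have hx' : x ∈ R' := (hmemR' x).mpr ⟨h3, hgt⟩
          simp [h3, hx', h2]
        · have hxn : x ∉ R' := fun hx' => h3 ((hmemR' x).mp hx').1
          simp [h3, hxn, h2]
    · rintro ⟨ha, hb⟩
      simp at ha hb
      have h1 := ((hmemR' x).mp ha).2
      have h2 := ((hL x).mp hb).2
      omega
  have hleavesPerm : st.2.2.2.Perm (R.filter (fun v => decide (degIn adjd R v ≤ 1))) := by
    refine (List.perm_ext_iff_of_nodup hs4 (List.Nodup.filter _ hRnd)).mpr ?_
    intro a
    rw [hL a, List.mem_filter]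
    simp
  refine ⟨?_, ?_, ?_, m4, ?_⟩
  · have e1 : survivors vs st'.1 = (survivors vs st.1).filter (fun x => !(decide (x ∈ st.2.2.2))) := by
      unfold survivors
      rw [List.filter_filter]
      apply List.filter_congr
      intro x _
      rw [contains_eq_decide, contains_eq_decide]
      by_cases hx1 : x ∈ st.1 <;> by_cases hx2 : x ∈ st.2.2.2 <;>
        simp [hx1, hx2, m1 x]
    rw [e1, hs1]
    apply List.filter_congr
    intro x hx
    by_cases h2 : x ∈ st.2.2.2
    · have := ((hL x).mp h2).2
      simp [h2]
      omega
    · have := (hnotleaves x hx).mp h2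
      simp [h2]
      omega
  · show st'.2.1 = _
    rw [m2, hs2]
    have hlen1 : st.2.2.2.length = (R.filter (fun v => decide (degIn adjd R v ≤ 1))).length :=
      hleavesPerm.length_eq
    have hlen2 : R.length = R'.length + (R.filter (fun v => decide (degIn adjd R v ≤ 1))).length := by
      rw [hR']
      rw [List.length_eq_length_filter_add (f := fun v => decide (1 < degIn adjd R v))]
      congr 1
      refine congrArg List.length (List.filter_congr ?_)
      intro x _
      by_cases h : 1 < degIn adjd R x
      · simp [h]
      · simp [h]
        omega
    omega
  · intro u huR'
    obtain ⟨huR, hgt⟩ := (hmemR' u).mp huR'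
    have hul : u ∉ st.2.2.2 := (hnotleaves u huR).mpr hgt
    rw [m3 u huR hul]
    have := hpart u
    omega
  · intro u
    rw [m5 u]
    constructor
    · rintro ⟨huR, hul, hle⟩
      have hgt : 1 < degIn adjd R u := (hnotleaves u huR).mp hul
      refine ⟨(hmemR' u).mpr ⟨huR, hgt⟩, ?_⟩
      have := hpart u
      omega
    · rintro ⟨huR', hle⟩
      obtain ⟨huR, hgt⟩ := (hmemR' u).mp huR'
      have hul : u ∉ st.2.2.2 := (hnotleaves u huR).mpr hgt
      refine ⟨huR, hul, ?_⟩
      have := hpart u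
      omega

lemma lockstep (adjd : PySem.Dict Int (List Int)) (vs : List Int) (hSym : SymG adjd vs) :
    ∀ (f : Nat) (st : StA) (R : List Int), OuterInv adjd vs R st →
      survivors vs (whileA adjd f st).1 = whileB adjd f R := by
  intro f
  induction f with
  | zero => intro st R hinv; simpa [whileA, whileB] using hinv.1
  | succ f ih =>
      intro st R hinv
      have hlen : st.2.1 = (R.length : Int) := hinv.2.1
      by_cases hc : 2 < R.length
      · have hc' : 2 < st.2.1 := by rw [hlen]; exact_mod_cast hc
        rw [whileA, whileB, if_pos hc', if_pos hc]
        exact ih _ _ (round_spec adjd vs R hSym st hinv)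
      · have hc' : ¬ 2 < st.2.1 := by rw [hlen]; exact_mod_cast hc
        rw [whileA, whileB, if_neg hc', if_neg hc]
        exact hinv.1

lemma pick_min (x y : List String) :
    (if tupLt (y, x) (x, y) then (y, x) else (x, y)) =
    (if strListLt y x then (y, x) else (x, y)) := by
  by_cases h1 : strListLt y x <;> by_cases h2 : strListLt x y <;>
    simp [tupLt, h1, h2]

lemma main_lemma (adj : List (Int × List Int)) (hpre : Pre_canonical_tree adj) :
    canonical_tree adj = canonical_tree_alt adj := by
  obtain ⟨hnd, hrest⟩ := hpre
  simp only [canonical_tree, canonical_tree_alt]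
  set adjd := PySem.Dict.mk adj with hadjd
  set vs := PySem.List.sorted adjd.keys (fun v => v) false with hvs
  by_cases h0 : vs.length = 0
  · simp [h0]
  by_cases h1 : vs.length = 1
  · simp [h1]
  by_cases h2 : vs.length = 2
  · simp [h2]
  have h3 : 3 ≤ vs.length := by omega
  have hkeys : adjd.keys = adj.map Prod.fst := rfl
  have hlenadj : vs.length = adj.length := by
    rw [hvs, PySem.List.length_sorted, hkeys, List.length_map]
  obtain ⟨ht1, ht2, _, _⟩ := Or.resolve_left hrest (by omega)
  have hkeysnd : adjd.keys.Nodup := by rw [hkeys]; exact hnd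
  have hmemvs : ∀ x : Int, x ∈ vs ↔ x ∈ adj.map Prod.fst := by
    intro x
    rw [hvs, PySem.List.mem_sorted, hkeys]
  have hvsnd : vs.Nodup := by
    rw [hvs]
    exact ((PySem.List.sorted_perm adjd.keys (fun v => v) false).nodup_iff).mpr hkeysnd
  have hget : ∀ p ∈ adj, adjd.getD p.1 [] = p.2 := by
    intro p hp
    exact PySem.Dict.getD_of_mem_items adjd hp hkeysnd []
  have hgetv : ∀ v ∈ vs, ∃ p ∈ adj, p.1 = v ∧ adjd.getD v [] = p.2 := by
    intro v hv
    obtain ⟨p, hp, hpv⟩ := List.mem_map.mp ((hmemvs v).mp hv)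
    exact ⟨p, hp, hpv, by rw [← hpv]; exact hget p hp⟩
  have hSym : SymG adjd vs := by
    refine ⟨hvsnd, ?_, ?_, ?_⟩
    · intro v hv
      obtain ⟨p, hp, _, hpe⟩ := hgetv v hv
      rw [hpe]
      exact (ht1 p hp).1
    · intro v hv u hu
      obtain ⟨p, hp, _, hpe⟩ := hgetv v hv
      rw [hpe] at hu
      exact (hmemvs u).mpr ((ht1 p hp).2.2 u hu)
    · intro v hv u hu
      obtain ⟨p, hp, hpv, hpe⟩ := hgetv v hv
      rw [hpe] at hu
      have hh := ht2 p hp u hu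
      rw [hpv] at hh
      exact hh
  set deg0 := vs.foldl (fun d v => d.insert v ((adjd.getD v []).length : Int))
    PySem.Dict.empty with hdeg0
  set leaves0 := vs.filter (fun v => decide (deg0.getD v 0 ≤ 1)) with hleaves0
  have hdeg0get : ∀ u ∈ vs, deg0.getD u 0 = ((adjd.getD u []).length : Int) := by
    intro u hu
    have hfresh := PySem.Dict.items_foldl_insert_fresh vs (fun v => v)
      (fun v => ((adjd.getD v []).length : Int)) PySem.Dict.empty
      (fun a _ => PySem.Dict.contains_empty a) (by simpa using hvsnd)
    have hitems : deg0.items = vs.map (fun v => (v, ((adjd.getD v []).length : Int))) := by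
      rw [hdeg0]
      simpa using hfresh
    have hknd : deg0.keys.Nodup := by
      show (deg0.items.map Prod.fst).Nodup
      rw [hitems, List.map_map]
      simpa [show (Prod.fst ∘ fun v => (v, ((adjd.getD v []).length : Int))) =
        (fun v : Int => v) from rfl] using hvsnd
    exact PySem.Dict.getD_of_mem_items deg0
      (by rw [hitems]; exact List.mem_map.mpr ⟨u, hu, rfl⟩) hknd 0
  have hdegvs : ∀ u ∈ vs, degIn adjd vs u = (adjd.getD u []).length := by
    intro u hu
    unfold degIn
    exact List.countP_eq_length.mpr (fun x hx => by simp [hSym.2.2.1 u hu x hx])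
  have hinit : OuterInv adjd vs vs (PySem.Set.empty, (vs.length : Int), deg0, leaves0) := by
    unfold OuterInv
    refine ⟨?_, rfl, ?_, ?_, ?_⟩
    · unfold survivors
      apply List.filter_eq_self.mpr
      intro a _
      rfl
    · intro u hu
      show deg0.getD u 0 = _
      rw [hdeg0get u hu, hdegvs u hu]
    · show leaves0.Nodup
      rw [hleaves0]
      exact List.Nodup.filter _ hvsnd
    · intro u
      show u ∈ leaves0 ↔ _
      rw [hleaves0, List.mem_filter]
      constructor
      · rintro ⟨hu, hb⟩
        have hx := of_decide_eq_true hb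
        rw [hdeg0get u hu] at hx
        have h := hdegvs u hu
        exact ⟨hu, by omega⟩
      · rintro ⟨hu, hle⟩
        refine ⟨hu, decide_eq_true ?_⟩
        rw [hdeg0get u hu]
        have h := hdegvs u hu
        omega
  have hcent := lockstep adjd vs hSym (vs.length + 1)
    (PySem.Set.empty, (vs.length : Int), deg0, leaves0) vs hinit
  have hcent' : vs.filter (fun v => !(PySem.Set.contains
      (whileA adjd (vs.length + 1) (PySem.Set.empty, (vs.length : Int), deg0, leaves0)).1 v))
      = whileB adjd (vs.length + 1) vs := hcent
  rw [if_neg h0, if_neg h1, if_neg h2, if_neg (show ¬ vs.length ≤ 1 by omega), if_neg h2]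
  rw [hcent']
  by_cases hc1 : (whileB adjd (vs.length + 1) vs).length = 1
  · rw [if_pos hc1, if_pos hc1]
  · rw [if_neg hc1, if_neg hc1, pick_min]

-- ===== VERDICT (by name: the statement is the Claim_ definition above) =====
theorem canonical_tree_spec : Claim_equal_canonical_tree := by
  intro adj _ hpre
  unfold Spec_canonical_tree
  exact main_lemma adj hpre
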